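-- pv_equiv track=rewrite | github.com/armqsour/algorithm | sort/count_sort.py | counting_sort_with_negatives
-- ===== SOURCE A (Python) =====
-- def counting_sort_with_negatives(arr):
--     if not arr:
--         return arr
--
--     min_val = min(arr)
--     max_val = max(arr)
--     offset = -min_val  # 偏移量
--     range_size = max_val - min_val + 1
--     count = [0] * range_size
--
--     # 统计频次（偏移后）
--     for num in arr:
--         count[num + offset] += 1
--
--     # 重构结果
--     result = []
--     for value in range(range_size):
--         freq = count[value]
--         original_value = value - offset
--         result.extend([original_value] * freq)
--
--     return result
-- ===== SOURCE B (Python) =====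
-- def counting_sort_with_negatives(arr):
--     # Same ascending order; comparison sort instead of a count table.
--     return sorted(arr)
-- ===== Notes on version B (the rewrite author's own statement) =====
-- stated objective: simpler
-- what changed: Replaces the min/max scan, offset count table and range-reconstruction loop with a single comparison sort: return sorted(arr).
import Mathlib
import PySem

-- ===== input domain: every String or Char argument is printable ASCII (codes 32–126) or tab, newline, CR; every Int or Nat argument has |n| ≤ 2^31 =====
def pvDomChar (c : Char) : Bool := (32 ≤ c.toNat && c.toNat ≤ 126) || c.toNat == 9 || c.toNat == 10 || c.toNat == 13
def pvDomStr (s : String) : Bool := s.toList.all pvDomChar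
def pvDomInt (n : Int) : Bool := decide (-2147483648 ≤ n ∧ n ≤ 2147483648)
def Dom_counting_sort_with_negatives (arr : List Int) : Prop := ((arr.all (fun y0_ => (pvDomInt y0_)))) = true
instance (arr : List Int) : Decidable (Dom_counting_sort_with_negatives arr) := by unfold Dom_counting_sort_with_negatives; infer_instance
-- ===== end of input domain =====

-- B replaces the count-table counting sort by a single comparison sort (objective: simpler).

-- ===== PORT A =====
def counting_sort_with_negatives (arr : List Int) : List Int :=
  if arr = [] then arr
  else
    match PySem.List.min? arr (fun x => x), PySem.List.max? arr (fun x => x) with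
    | some min_val, some max_val =>
      let offset : Int := -min_val
      let range_size : Int := max_val - min_val + 1
      let count0 : Array Int := Array.replicate range_size.toNat 0
      -- Python's count list is an O(1)-indexed array; every index num + offset is nonnegative
      -- and < range_size here, so Nat indexing via .toNat is exact
      let count := arr.foldl
        (fun c num => c.setIfInBounds (num + offset).toNat (c.getD (num + offset).toNat 0 + 1)) count0
      (PySem.List.pyRange 0 range_size 1).foldl
        (fun result value =>
          let freq := count.getD value.toNat 0
          let original_value := value - offset
          result ++ PySem.List.pyRepeat [original_value] freq) []
    | _, _ => []  -- unreachable: arr ≠ [], so min/max are some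

-- ===== PORT B =====
def counting_sort_with_negatives_alt (arr : List Int) : List Int :=
  PySem.List.sorted arr (fun x => x) false

-- ===== PRECONDITION & SPEC =====
def Spec_counting_sort_with_negatives (arr : List Int) (out : List Int) : Prop := out = counting_sort_with_negatives_alt arr
instance (arr : List Int) (out : List Int) : Decidable (Spec_counting_sort_with_negatives arr out) := by unfold Spec_counting_sort_with_negatives; infer_instance

-- ===== CLAIM (what is proved, stated in full; the proofs are below) =====
def Claim_equal_counting_sort_with_negatives : Prop := ∀ (arr : List Int), Dom_counting_sort_with_negatives arr → Spec_counting_sort_with_negatives arr (counting_sort_with_negatives arr)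

-- ===== LEMMAS AND PROOFS =====

-- getD after a within-range setIfInBounds
lemma getD_set_eq_ite (c : Array Int) (j k : Nat) (v : Int) (hj : j < c.size) :
    (c.setIfInBounds j v).getD k 0 = if j = k then v else c.getD k 0 := by
  simp [Array.getD_eq_getD_getElem?, Array.getElem?_setIfInBounds, hj]
  split_ifs <;> simp_all

lemma getD_replicate_zero (n k : Nat) : (Array.replicate n (0 : Int)).getD k 0 = 0 := by
  simp only [Array.getD_eq_getD_getElem?, Array.getElem?_replicate]
  split_ifs <;> simp

-- the count table computed by A's first loop
lemma foldl_set_count (off : Int) :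
    ∀ (l : List Int) (c : Array Int),
      (∀ x ∈ l, 0 ≤ x + off ∧ (x + off).toNat < c.size) →
      ∀ k : Nat,
      (l.foldl (fun c num => c.setIfInBounds (num + off).toNat (c.getD (num + off).toNat 0 + 1)) c).getD k 0
        = c.getD k 0 + (l.count ((k : Int) - off) : Int) := by
  intro l
  induction l with
  | nil => intro c _ k; simp
  | cons num t ih =>
    intro c hc k
    have hnum := hc num (by simp)
    have hlen : (c.setIfInBounds (num + off).toNat (c.getD (num + off).toNat 0 + 1)).size = c.size := by
      simp
    have ht : ∀ x ∈ t, 0 ≤ x + off ∧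
        (x + off).toNat < (c.setIfInBounds (num + off).toNat (c.getD (num + off).toNat 0 + 1)).size := by
      intro x hx; rw [hlen]; exact hc x (by simp [hx])
    rw [List.foldl_cons, ih _ ht k,
        getD_set_eq_ite c ((num + off).toNat) k _ hnum.2]
    rw [List.count_cons]
    by_cases h : (num + off).toNat = k
    · have hkn : (k : Int) - off = num := by omega
      simp only [hkn, beq_self_eq_true, if_true, h]
      push_cast
      ring
    · have h3 : ¬ ((k : Int) - off = num) := by omega
      have h4 : ¬ (num = (k : Int) - off) := fun hh => h3 hh.symm
      simp [if_neg h, h4]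

-- sum of a one-hot map over a nodup list
lemma sum_map_onehot (x off : Int) (N : Int → Nat) :
    ∀ vs : List Int, vs.Nodup →
      ((vs.map (fun v => if v - off = x then N v else 0)).sum)
        = if x + off ∈ vs then N (x + off) else 0 := by
  intro vs
  induction vs with
  | nil => simp
  | cons v t ih =>
    intro hnd
    rcases List.nodup_cons.mp hnd with ⟨hv, hnt⟩
    by_cases h : v - off = x
    · have hveq : v = x + off := by omega
      have hxt : x + off ∉ t := by rw [← hveq]; exact hv
      simp [ih hnt, hxt, hveq]
    · have hvne : ¬ x + off = v := by omega
      simp [h, ih hnt, hvne]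

-- a flatMap of constant blocks along a strictly increasing index list is sorted
lemma pairwise_flatMap_replicate (f : Int → Nat) (g : Int → Int)
    (hg : ∀ a b : Int, a < b → g a ≤ g b) :
    ∀ vs : List Int, vs.Pairwise (· < ·) →
      (vs.flatMap (fun v => List.replicate (f v) (g v))).Pairwise (· ≤ ·) := by
  intro vs
  induction vs with
  | nil => simp
  | cons v t ih =>
    intro hp
    rcases List.pairwise_cons.mp hp with ⟨hv, ht⟩
    rw [List.flatMap_cons, List.pairwise_append]
    refine ⟨List.pairwise_replicate.mpr (by simp), ih ht, ?_⟩
    intro a ha b hb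
    have ha' : a = g v := List.eq_of_mem_replicate ha
    rcases List.mem_flatMap.mp hb with ⟨w, hw, hbw⟩
    have hb' : b = g w := List.eq_of_mem_replicate hbw
    subst ha' hb'
    exact hg v w (hv w hw)

lemma counting_eq_sorted (arr : List Int) :
    counting_sort_with_negatives arr = counting_sort_with_negatives_alt arr := by
  by_cases hnil : arr = []
  · subst hnil; rfl
  · rcases h1 : PySem.List.min? arr (fun x => x) with _ | mn
    · exact absurd ((PySem.List.min?_eq_none_iff arr _).mp h1) hnil
    rcases h2 : PySem.List.max? arr (fun x => x) with _ | mx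
    · exact absurd ((PySem.List.max?_eq_none_iff arr _).mp h2) hnil
    have hmin : ∀ y ∈ arr, mn ≤ y := PySem.List.min?_isMin h1
    have hmax : ∀ y ∈ arr, y ≤ mx := PySem.List.max?_isMax h2
    have hmnmx : mn ≤ mx := by
      rcases List.exists_mem_of_ne_nil arr hnil with ⟨y, hy⟩
      exact le_trans (hmin y hy) (hmax y hy)
    set off : Int := -mn with hoff
    set R : Int := mx - mn + 1 with hR
    -- the count table
    set cnt : Array Int := arr.foldl
      (fun c num => c.setIfInBounds (num + off).toNat (c.getD (num + off).toNat 0 + 1))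
      (Array.replicate R.toNat 0) with hcnt
    have hbound : ∀ x ∈ arr, 0 ≤ x + off ∧ (x + off).toNat < (Array.replicate R.toNat (0:Int)).size := by
      intro x hx
      have := hmin x hx; have := hmax x hx
      constructor <;> [omega; (simp [Array.size_replicate]; omega)]
    have hcnt_val : ∀ k : Nat, cnt.getD k 0 = (arr.count ((k : Int) - off) : Int) := by
      intro k
      rw [hcnt, foldl_set_count off arr _ hbound k, getD_replicate_zero]
      ring
    -- unfold A's port
    have hA : counting_sort_with_negatives arr
        = (PySem.List.pyRange 0 R 1).flatMap
            (fun v => List.replicate (arr.count (v - off)) (v - off)) := by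
      unfold counting_sort_with_negatives
      rw [if_neg hnil, h1, h2]
      simp only
      rw [← hoff, ← hR, ← hcnt]
      rw [PySem.List.foldl_append_eq_flatMap
        (fun value => PySem.List.pyRepeat [value - off] (cnt.getD value.toNat 0))]
      rw [List.nil_append]
      apply List.flatMap_congr  -- congruence over members of the range
      intro v hv
      have hv' : 0 ≤ v ∧ v < R := PySem.List.mem_pyRange_one.mp hv
      rw [PySem.List.pyRepeat_singleton]
      congr 1
      rw [hcnt_val v.toNat]
      have : ((v.toNat : Int)) = v := Int.toNat_of_nonneg hv'.1
      rw [this, Int.toNat_natCast]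
    -- the flatMap is sorted and a permutation of arr
    set ys : List Int := (PySem.List.pyRange 0 R 1).flatMap
        (fun v => List.replicate (arr.count (v - off)) (v - off)) with hys
    have hpair : ys.Pairwise (· ≤ ·) := by
      exact pairwise_flatMap_replicate (fun v => arr.count (v - off)) (fun v => v - off)
        (fun a b hab => sub_le_sub_right hab.le off) _ (PySem.List.pairwise_lt_pyRange_one 0 R)
    have hperm : ys.Perm arr := by
      rw [List.perm_iff_count]
      intro a
      rw [hys, List.count_flatMap]
      have hmapeq : (List.map (List.count a ∘ fun v => List.replicate (arr.count (v - off)) (v - off))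
            (PySem.List.pyRange 0 R 1))
          = (PySem.List.pyRange 0 R 1).map (fun v => if v - off = a then arr.count (v - off) else 0) := by
        apply List.map_congr_left
        intro v _
        simp [Function.comp, List.count_replicate, beq_iff_eq]
      rw [hmapeq, sum_map_onehot a off (fun v => arr.count (v - off)) _
        (PySem.List.nodup_pyRange_one 0 R)]
      by_cases hm : a + off ∈ PySem.List.pyRange 0 R 1
      · rw [if_pos hm]
        simp
      · have hb := (PySem.List.mem_pyRange_one (x := a + off) (a := 0) (b := R)).not.mp hm
        rw [not_and_or] at hb
        have hna : a ∉ arr := by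
          intro hc
          have := hmin a hc; have := hmax a hc
          omega
        rw [if_neg hm, List.count_eq_zero.mpr hna]
    rw [hA]
    unfold counting_sort_with_negatives_alt
    exact (PySem.List.sorted_id_eq_of_perm_of_pairwise arr ys hperm hpair).symm

-- ===== VERDICT (by name: the statement is the Claim_ definition above) =====
theorem counting_sort_with_negatives_spec : Claim_equal_counting_sort_with_negatives := by
  intro arr _
  unfold Spec_counting_sort_with_negatives
  exact counting_eq_sorted arr
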